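-- pv_equiv track=rewrite | github.com/samuelassaraf/snake-genetic-algorithm-neural-network | serpent.py | if_queue
-- ===== SOURCE A (Python) =====
-- def if_queue(serpent, direction):
--     tete = serpent[0]
--     queue = serpent[1:]
--
--     if direction == 'GAUCHE':
--         for segment in queue:
--             if segment[1] == tete[1] and segment[0] < tete[0]:
--                 return 1
--     elif direction == 'DROITE':
--         for segment in queue:
--             if segment[1] == tete[1] and segment[0] > tete[0]:
--                 return 1
--     elif direction == 'HAUT':
--         for segment in queue:
--             if segment[0] == tete[0] and segment[1] < tete[1]:
--                 return 1
--     elif direction == 'BAS':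
--         for segment in queue:
--             if segment[0] == tete[0] and segment[1] > tete[1]:
--                 return 1
--     elif direction == 'HAUT_GAUCHE':
--         for segment in queue:
--             if segment[0] < tete[0] and segment[1] < tete[1]:
--                 return 1
--     elif direction == 'HAUT_DROITE':
--         for segment in queue:
--             if segment[0] > tete[0] and segment[1] < tete[1]:
--                 return 1
--     elif direction == 'BAS_GAUCHE':
--         for segment in queue:
--             if segment[0] < tete[0] and segment[1] > tete[1]:
--                 return 1
--     elif direction == 'BAS_DROITE':
--         for segment in queue:
--             if segment[0] > tete[0] and segment[1] > tete[1]: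
--                 return 1
--
--     return 0
-- ===== SOURCE B (Python) =====
-- _NAMES = {
--     (-1, 0): 'GAUCHE', (1, 0): 'DROITE', (0, -1): 'HAUT', (0, 1): 'BAS',
--     (-1, -1): 'HAUT_GAUCHE', (1, -1): 'HAUT_DROITE',
--     (-1, 1): 'BAS_GAUCHE', (1, 1): 'BAS_DROITE',
-- }
--
--
-- def if_queue(serpent, direction):
--     hx, hy = serpent[0]
--     present = set()
--     for x, y in serpent[1:]:
--         name = _NAMES.get(((x > hx) - (x < hx), (y > hy) - (y < hy)))
--         if name is not None:
--             present.add(name)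
--     return int(direction in present)
-- ===== Notes on version B (the rewrite author's own statement) =====
-- stated objective: alternative
-- what changed: Inverts the computation: instead of selecting one of eight predicate-driven early-exit scans by the direction argument, B classifies every tail segment into its direction name (via a sign-pair-to-name table), accumulates the set of directions present, and answers with a single membership test at the end.
import Mathlib
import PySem

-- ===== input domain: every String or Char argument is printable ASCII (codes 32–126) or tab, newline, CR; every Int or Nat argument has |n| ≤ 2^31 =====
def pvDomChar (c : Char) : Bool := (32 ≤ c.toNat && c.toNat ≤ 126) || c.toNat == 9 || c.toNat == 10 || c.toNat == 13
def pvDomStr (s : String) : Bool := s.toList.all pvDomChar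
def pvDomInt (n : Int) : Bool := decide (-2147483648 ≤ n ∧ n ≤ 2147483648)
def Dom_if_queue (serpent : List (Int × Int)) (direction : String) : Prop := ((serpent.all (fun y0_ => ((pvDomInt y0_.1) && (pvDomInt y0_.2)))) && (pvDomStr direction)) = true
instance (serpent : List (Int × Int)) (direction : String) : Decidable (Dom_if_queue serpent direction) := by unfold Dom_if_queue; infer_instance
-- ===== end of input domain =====

-- B inverts A's computation: instead of selecting one of eight early-exit predicate scans by
-- the direction argument, it classifies every tail segment into its direction name, collects
-- the set of direction names present, and answers by one membership test (objective: alternative).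

-- ===== PORT A =====
-- each of A's eight 'for segment in queue: if <cond>: return 1' loops (falls through to 'return 0')
def ifQueueScanA (queue : List (Int × Int)) (cond : (Int × Int) → Bool) : Int :=
  match queue with
  | [] => 0
  | segment :: rest => if cond segment then 1 else ifQueueScanA rest cond

def if_queue (serpent : List (Int × Int)) (direction : String) : Int :=
  match PySem.List.pyGet? serpent 0 with
  | none => 0  -- unreachable under Pre_if_queue: serpent[0] raises IndexError
  | some tete =>
    let queue := PySem.List.slice serpent (some 1) none
    if direction == "GAUCHE" then
      ifQueueScanA queue (fun s => s.2 == tete.2 && decide (s.1 < tete.1))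
    else if direction == "DROITE" then
      ifQueueScanA queue (fun s => s.2 == tete.2 && decide (s.1 > tete.1))
    else if direction == "HAUT" then
      ifQueueScanA queue (fun s => s.1 == tete.1 && decide (s.2 < tete.2))
    else if direction == "BAS" then
      ifQueueScanA queue (fun s => s.1 == tete.1 && decide (s.2 > tete.2))
    else if direction == "HAUT_GAUCHE" then
      ifQueueScanA queue (fun s => decide (s.1 < tete.1) && decide (s.2 < tete.2))
    else if direction == "HAUT_DROITE" then
      ifQueueScanA queue (fun s => decide (s.1 > tete.1) && decide (s.2 < tete.2))
    else if direction == "BAS_GAUCHE" then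
      ifQueueScanA queue (fun s => decide (s.1 < tete.1) && decide (s.2 > tete.2))
    else if direction == "BAS_DROITE" then
      ifQueueScanA queue (fun s => decide (s.1 > tete.1) && decide (s.2 > tete.2))
    else 0

-- ===== PORT B =====
-- _NAMES: sign pair of (segment - head) → direction name
def ifQueueNames : PySem.Dict (Int × Int) String :=
  PySem.Dict.ofList
    [((-1, 0), "GAUCHE"), ((1, 0), "DROITE"), ((0, -1), "HAUT"), ((0, 1), "BAS"),
     ((-1, -1), "HAUT_GAUCHE"), ((1, -1), "HAUT_DROITE"),
     ((-1, 1), "BAS_GAUCHE"), ((1, 1), "BAS_DROITE")]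

-- ((x > hx) - (x < hx), (y > hy) - (y < hy)): bools coerce to 0/1 ints in Python
def ifQueueKey (tete seg : Int × Int) : Int × Int :=
  ((if seg.1 > tete.1 then (1 : Int) else 0) - (if seg.1 < tete.1 then 1 else 0),
   (if seg.2 > tete.2 then (1 : Int) else 0) - (if seg.2 < tete.2 then 1 else 0))

-- loop body: name = _NAMES.get(key); if name is not None: present.add(name)
def ifQueueClassify (tete : Int × Int) (present : PySem.Set String) (seg : Int × Int) : PySem.Set String :=
  match PySem.Dict.get? ifQueueNames (ifQueueKey tete seg) with
  | some name => PySem.Set.add present name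
  | none => present

def if_queue_alt (serpent : List (Int × Int)) (direction : String) : Int :=
  match PySem.List.pyGet? serpent 0 with
  | none => 0  -- unreachable under Pre_if_queue: serpent[0] raises IndexError
  | some tete =>
    let present := (PySem.List.slice serpent (some 1) none).foldl (ifQueueClassify tete) PySem.Set.empty
    if PySem.Set.contains present direction then 1 else 0

-- ===== PRECONDITION & SPEC =====
-- Pre_ excludes only the empty list, on which serpent[0] raises IndexError in both A and B
def Pre_if_queue (serpent : List (Int × Int)) (direction : String) : Prop := serpent ≠ []
instance (serpent : List (Int × Int)) (direction : String) : Decidable (Pre_if_queue serpent direction) := by unfold Pre_if_queue; infer_instance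

def pvWitness_if_queue : (List (Int × Int)) × String := ([(2, 3), (1, 3)], "GAUCHE")

def Spec_if_queue (serpent : List (Int × Int)) (direction : String) (out : Int) : Prop := out = if_queue_alt serpent direction
instance (serpent : List (Int × Int)) (direction : String) (out : Int) : Decidable (Spec_if_queue serpent direction out) := by unfold Spec_if_queue; infer_instance

-- ===== CLAIM (what is proved, stated in full; the proofs are below) =====
def Claim_equal_if_queue : Prop := ∀ (serpent : List (Int × Int)) (direction : String), Dom_if_queue serpent direction → Pre_if_queue serpent direction → Spec_if_queue serpent direction (if_queue serpent direction)

-- ===== LEMMAS AND PROOFS =====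

theorem ifQueueScanA_eq_any (p : (Int × Int) → Bool) :
    ∀ queue, ifQueueScanA queue p = if queue.any p then 1 else 0 := by
  intro queue
  induction queue with
  | nil => rfl
  | cons s rest ih =>
    cases hp : p s
    · have h1 : ifQueueScanA (s :: rest) p = ifQueueScanA rest p := by
        simp [ifQueueScanA, hp]
      have h2 : (s :: rest).any p = rest.any p := by simp [hp]
      rw [h1, h2, ih]
    · have h1 : ifQueueScanA (s :: rest) p = 1 := by simp [ifQueueScanA, hp]
      have h2 : (s :: rest).any p = true := by simp [hp]
      rw [h1, h2, if_pos rfl]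

theorem ifQueue_mem_foldl (tete : Int × Int) (d : String) :
    ∀ (queue : List (Int × Int)) (acc : PySem.Set String),
      d ∈ queue.foldl (ifQueueClassify tete) acc ↔
        d ∈ acc ∨ ∃ s ∈ queue, PySem.Dict.get? ifQueueNames (ifQueueKey tete s) = some d := by
  intro queue
  induction queue with
  | nil => simp
  | cons s rest ih =>
    intro acc
    simp only [List.foldl_cons, ih, List.mem_cons]
    unfold ifQueueClassify
    rcases hg : PySem.Dict.get? ifQueueNames (ifQueueKey tete s) with _ | name
    · constructor
      · rintro (h | ⟨t, ht, hget⟩)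
        · exact Or.inl h
        · exact Or.inr ⟨t, Or.inr ht, hget⟩
      · rintro (h | ⟨t, (rfl | ht), hget⟩)
        · exact Or.inl h
        · rw [hg] at hget; cases hget
        · exact Or.inr ⟨t, ht, hget⟩
    · rw [PySem.Set.mem_add]
      constructor
      · rintro (⟨h | rfl⟩ | ⟨t, ht, hget⟩)
        · exact Or.inl h
        · exact Or.inr ⟨s, Or.inl rfl, hg⟩
        · exact Or.inr ⟨t, Or.inr ht, hget⟩
      · rintro (h | ⟨t, (rfl | ht), hget⟩)
        · exact Or.inl (Or.inl h)
        · rw [hg] at hget; exact Or.inl (Or.inr (Option.some_injective _ hget).symm)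
        · exact Or.inr ⟨t, ht, hget⟩

theorem ifQueueKey_lit (tete s : Int × Int) (a b : Int)
    (ha : (s.1 < tete.1 ∧ a = -1) ∨ (s.1 = tete.1 ∧ a = 0) ∨ (tete.1 < s.1 ∧ a = 1))
    (hb : (s.2 < tete.2 ∧ b = -1) ∨ (s.2 = tete.2 ∧ b = 0) ∨ (tete.2 < s.2 ∧ b = 1)) :
    ifQueueKey tete s = (a, b) := by
  unfold ifQueueKey
  simp only [Prod.mk.injEq, gt_iff_lt]
  constructor <;> (split_ifs <;> omega)

-- the classifying lookup, written out by the nine sign cases of (segment - head)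
theorem ifQueueNames_key (tete s : Int × Int) :
    PySem.Dict.get? ifQueueNames (ifQueueKey tete s) =
      if s.1 < tete.1 then
        (if s.2 < tete.2 then some "HAUT_GAUCHE" else if tete.2 < s.2 then some "BAS_GAUCHE" else some "GAUCHE")
      else if tete.1 < s.1 then
        (if s.2 < tete.2 then some "HAUT_DROITE" else if tete.2 < s.2 then some "BAS_DROITE" else some "DROITE")
      else (if s.2 < tete.2 then some "HAUT" else if tete.2 < s.2 then some "BAS" else none) := by
  rcases lt_trichotomy s.1 tete.1 with hx | hx | hx <;> rcases lt_trichotomy s.2 tete.2 with hy | hy | hy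
  · rw [ifQueueKey_lit tete s (-1) (-1) (by omega) (by omega), if_pos hx, if_pos hy]; decide
  · rw [ifQueueKey_lit tete s (-1) 0 (by omega) (by omega), if_pos hx, if_neg (by omega), if_neg (by omega)]; decide
  · rw [ifQueueKey_lit tete s (-1) 1 (by omega) (by omega), if_pos hx, if_neg (by omega), if_pos hy]; decide
  · rw [ifQueueKey_lit tete s 0 (-1) (by omega) (by omega), if_neg (by omega), if_neg (by omega), if_pos hy]; decide
  · rw [ifQueueKey_lit tete s 0 0 (by omega) (by omega), if_neg (by omega), if_neg (by omega), if_neg (by omega), if_neg (by omega)]; decide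
  · rw [ifQueueKey_lit tete s 0 1 (by omega) (by omega), if_neg (by omega), if_neg (by omega), if_neg (by omega), if_pos hy]; decide
  · rw [ifQueueKey_lit tete s 1 (-1) (by omega) (by omega), if_neg (by omega), if_pos hx, if_pos hy]; decide
  · rw [ifQueueKey_lit tete s 1 0 (by omega) (by omega), if_neg (by omega), if_pos hx, if_neg (by omega), if_neg (by omega)]; decide
  · rw [ifQueueKey_lit tete s 1 1 (by omega) (by omega), if_neg (by omega), if_pos hx, if_neg (by omega), if_pos hy]; decide

-- a branch of A equals B's final membership test, given the segmentwise agreement of predicate and label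
theorem ifQueue_branch_eq (tete : Int × Int) (queue : List (Int × Int)) (d : String)
    (p : (Int × Int) → Bool)
    (h : ∀ s, (PySem.Dict.get? ifQueueNames (ifQueueKey tete s) = some d) ↔ p s = true) :
    ifQueueScanA queue p =
      if PySem.Set.contains (queue.foldl (ifQueueClassify tete) PySem.Set.empty) d then 1 else 0 := by
  rw [ifQueueScanA_eq_any]
  have hb : queue.any p = PySem.Set.contains (queue.foldl (ifQueueClassify tete) PySem.Set.empty) d := by
    rw [Bool.eq_iff_iff, PySem.Set.contains_iff, ifQueue_mem_foldl]
    simp only [PySem.Set.empty, List.not_mem_nil, false_or, List.any_eq_true]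
    constructor
    · rintro ⟨t, ht, hp⟩; exact ⟨t, ht, (h t).2 hp⟩
    · rintro ⟨t, ht, hget⟩; exact ⟨t, ht, (h t).1 hget⟩
  rw [hb]

-- unknown direction: B's set only ever holds the eight names, so membership is false
theorem ifQueue_unknown (tete : Int × Int) (queue : List (Int × Int)) (d : String)
    (h1 : d ≠ "GAUCHE") (h2 : d ≠ "DROITE") (h3 : d ≠ "HAUT") (h4 : d ≠ "BAS")
    (h5 : d ≠ "HAUT_GAUCHE") (h6 : d ≠ "HAUT_DROITE") (h7 : d ≠ "BAS_GAUCHE") (h8 : d ≠ "BAS_DROITE") :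
    (if PySem.Set.contains (queue.foldl (ifQueueClassify tete) PySem.Set.empty) d then (1 : Int) else 0) = 0 := by
  rw [if_neg]
  rw [PySem.Set.contains_iff, ifQueue_mem_foldl]
  simp only [PySem.Set.empty, List.not_mem_nil, false_or]
  rintro ⟨t, _, hget⟩
  rw [ifQueueNames_key] at hget
  split_ifs at hget <;> simp_all

-- ===== VERDICT (by name: the statement is the Claim_ definition above) =====
theorem if_queue_spec : Claim_equal_if_queue := by
  intro serpent direction _hdom hpre
  unfold Spec_if_queue
  match serpent, hpre with
  | tete :: rest, _ =>
    have hget : PySem.List.pyGet? (tete :: rest) (0 : Int) = some tete := by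
      simp [PySem.List.pyGet?, PySem.List.pyIdx?]
    have hslice : PySem.List.slice (tete :: rest) (some 1) none = rest := by
      simpa using PySem.List.slice_from (xs := tete :: rest) (a := 1) (by omega)
    simp only [if_queue, if_queue_alt, hget, hslice, beq_iff_eq]
    by_cases h1 : direction = "GAUCHE"
    · subst h1; rw [if_pos rfl]
      exact ifQueue_branch_eq tete rest _ _ (fun s => by
        rw [ifQueueNames_key]; split_ifs <;> simp_all <;> omega)
    rw [if_neg h1]
    by_cases h2 : direction = "DROITE"
    · subst h2; rw [if_pos rfl]
      exact ifQueue_branch_eq tete rest _ _ (fun s => by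
        rw [ifQueueNames_key]; split_ifs <;> simp_all <;> omega)
    rw [if_neg h2]
    by_cases h3 : direction = "HAUT"
    · subst h3; rw [if_pos rfl]
      exact ifQueue_branch_eq tete rest _ _ (fun s => by
        rw [ifQueueNames_key]; split_ifs <;> simp_all <;> omega)
    rw [if_neg h3]
    by_cases h4 : direction = "BAS"
    · subst h4; rw [if_pos rfl]
      exact ifQueue_branch_eq tete rest _ _ (fun s => by
        rw [ifQueueNames_key]; split_ifs <;> simp_all <;> omega)
    rw [if_neg h4]
    by_cases h5 : direction = "HAUT_GAUCHE"
    · subst h5; rw [if_pos rfl]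
      exact ifQueue_branch_eq tete rest _ _ (fun s => by
        rw [ifQueueNames_key]; split_ifs <;> simp_all)
    rw [if_neg h5]
    by_cases h6 : direction = "HAUT_DROITE"
    · subst h6; rw [if_pos rfl]
      exact ifQueue_branch_eq tete rest _ _ (fun s => by
        rw [ifQueueNames_key]; split_ifs <;> simp_all <;> omega)
    rw [if_neg h6]
    by_cases h7 : direction = "BAS_GAUCHE"
    · subst h7; rw [if_pos rfl]
      exact ifQueue_branch_eq tete rest _ _ (fun s => by
        rw [ifQueueNames_key]; split_ifs <;> simp_all <;> omega)
    rw [if_neg h7]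
    by_cases h8 : direction = "BAS_DROITE"
    · subst h8; rw [if_pos rfl]
      exact ifQueue_branch_eq tete rest _ _ (fun s => by
        rw [ifQueueNames_key]; split_ifs <;> simp_all <;> omega)
    rw [if_neg h8]
    exact (ifQueue_unknown tete rest direction h1 h2 h3 h4 h5 h6 h7 h8).symm
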